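-- pv_equiv track=rewrite | github.com/alexandraback/datacollection | solutions_5670465267826688_0/Python/ScottyP/C.py | get_running_product
-- ===== SOURCE A (Python) =====
-- mult_dict = {'11': '1', '1i':'i', '1j': 'j', '1k':'k',
--              'i1': 'i', 'ii':'1', 'ij': 'k', 'ik':'j',
--              'j1': 'j', 'ji':'k', 'jj': '1', 'jk':'i',
--              'k1': 'k', 'ki':'j', 'kj': 'i', 'kk':'1'}
--
-- sign_dict = {'11': 1, '1i':1, '1j': 1, '1k':1,
--              'i1': 1, 'ii':-1, 'ij': 1, 'ik':-1,
--              'j1': 1, 'ji':-1, 'jj': -1, 'jk':1,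
--              'k1': 1, 'ki':1, 'kj': -1, 'kk':-1}
--
-- def get_running_product(string_list):
--     # assume length at least 1
--     out_string_list = []
--     current_prod = string_list[0]
--     current_sign = 1
--     out_string_list.append(current_prod)
--     for i in range(1, len(string_list)):
--         string_bit = current_prod + string_list[i]
--         current_prod = mult_dict[string_bit]
--         current_sign *= sign_dict[string_bit]
--         if current_sign == -1:
--             out_string_list.append('-' + current_prod)
--         else:
--             out_string_list.append(current_prod)
--     return out_string_list
-- ===== SOURCE B (Python) =====
-- def get_running_product(string_list):
--     # Q8 presented as +/- i^a j^b with exponents in Z/2: the product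
--     # i^a j^b * i^c j^d = (-1)^(b*c + (a+c)//2 + (b+d)//2) i^((a+c)%2) j^((b+d)%2),
--     # so each step is pure exponent arithmetic (a sign cocycle), no case analysis.
--     E = {'1': (0, 0), 'i': (1, 0), 'j': (0, 1), 'k': (1, 1)}
--     S = {(0, 0): '1', (1, 0): 'i', (0, 1): 'j', (1, 1): 'k'}
--     out = [string_list[0]]
--     if len(string_list) > 1:
--         a, b = E[string_list[0]]
--         sign = 1
--         for s in string_list[1:]:
--             c, d = E[s]
--             sign *= (-1) ** (b * c + (a + c) // 2 + (b + d) // 2)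
--             a, b = (a + c) % 2, (b + d) % 2
--             out.append(S[(a, b)] if sign == 1 else '-' + S[(a, b)])
--     return out
-- ===== Notes on version B (the rewrite author's own statement) =====
-- stated objective: alternative
-- what changed: B replaces the 16-entry product/sign lookup tables by a group-theoretic representation: each unit is an exponent pair (a,b) of i^a j^b over Z/2, and every step is the single arithmetic formula sign *= (-1)^(b*c+(a+c)//2+(b+d)//2) with exponent addition mod 2 - no product table and no case analysis.
-- outside the precondition, e.g. on get_running_product(['', 'ij']): A returns ['', 'k'], B raises KeyError
import Mathlib
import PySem

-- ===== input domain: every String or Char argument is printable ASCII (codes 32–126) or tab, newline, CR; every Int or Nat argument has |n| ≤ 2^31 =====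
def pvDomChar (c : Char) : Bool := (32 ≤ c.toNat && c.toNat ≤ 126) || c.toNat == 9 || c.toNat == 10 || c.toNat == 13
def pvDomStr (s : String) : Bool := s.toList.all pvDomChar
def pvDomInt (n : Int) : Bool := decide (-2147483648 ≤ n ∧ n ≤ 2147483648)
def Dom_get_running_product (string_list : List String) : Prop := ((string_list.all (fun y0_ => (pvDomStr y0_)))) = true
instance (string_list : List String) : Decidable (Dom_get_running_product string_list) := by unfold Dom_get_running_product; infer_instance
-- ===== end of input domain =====

-- ===== PORT A =====
-- B represents Q8 as ± i^a j^b (exponents in Z/2) and computes each step by one sign-cocycle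
-- arithmetic formula instead of A's 16-entry product and sign lookup tables (alternative, same cost).

def multDict : PySem.Dict String String := PySem.Dict.mk
  [("11","1"),("1i","i"),("1j","j"),("1k","k"),
   ("i1","i"),("ii","1"),("ij","k"),("ik","j"),
   ("j1","j"),("ji","k"),("jj","1"),("jk","i"),
   ("k1","k"),("ki","j"),("kj","i"),("kk","1")]

def signDict : PySem.Dict String Int := PySem.Dict.mk
  [("11",1),("1i",1),("1j",1),("1k",1),
   ("i1",1),("ii",-1),("ij",1),("ik",-1),
   ("j1",1),("ji",-1),("jj",-1),("jk",1),
   ("k1",1),("ki",1),("kj",-1),("kk",-1)]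

-- one iteration of A's for-loop (state: out_string_list, current_prod, current_sign)
def aStep (st : List String × String × Int) (s : String) : List String × String × Int :=
  let (out, prod, sign) := st
  let bit := prod ++ s
  let prod' := (PySem.Dict.get? multDict bit).getD ""   -- KeyError (none) excluded by Pre_
  let sign' := sign * (PySem.Dict.get? signDict bit).getD 0
  (out ++ [if sign' = -1 then "-" ++ prod' else prod'], prod', sign')

def get_running_product (string_list : List String) : List String :=
  match string_list with
  | [] => []   -- string_list[0] raises IndexError on []; excluded by Pre_
  | x :: _ =>
    ((PySem.List.pyRange 1 (PySem.List.len string_list) 1).foldl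
      (fun st i => aStep st (PySem.List.pyGetD string_list i ""))
      ([x], x, (1 : Int))).1

-- ===== PORT B =====
-- E = {'1':(0,0),'i':(1,0),'j':(0,1),'k':(1,1)}
def qExp (s : String) : Int × Int :=
  (PySem.Dict.get? (PySem.Dict.mk [("1",((0:Int),(0:Int))),("i",(1,0)),("j",(0,1)),("k",(1,1))]) s).getD (0,0)   -- KeyError excluded by Pre_

-- S = {(0,0):'1',(1,0):'i',(0,1):'j',(1,1):'k'}
def qSym (a b : Int) : String :=
  (PySem.Dict.get? (PySem.Dict.mk [(((0:Int),(0:Int)),"1"),((1,0),"i"),((0,1),"j"),((1,1),"k")]) (a,b)).getD ""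

-- one iteration of B's for-loop (state: out, (a,b), sign).  The Python exponent of (-1)**… is
-- always ≥ 0 for unit inputs, so `.toNat` on it matches Python's ** exactly there.
def bStep (st : List String × (Int × Int) × Int) (s : String) : List String × (Int × Int) × Int :=
  let (out, ab, sign) := st
  let a := ab.1; let b := ab.2
  let cd := qExp s
  let c := cd.1; let d := cd.2
  let sign' := sign * (-1 : Int) ^ (b * c + PySem.Int.floordiv (a + c) 2 + PySem.Int.floordiv (b + d) 2).toNat
  let a' := PySem.Int.mod (a + c) 2
  let b' := PySem.Int.mod (b + d) 2
  (out ++ [if sign' = 1 then qSym a' b' else "-" ++ qSym a' b'], (a', b'), sign')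

def get_running_product_alt (string_list : List String) : List String :=
  match string_list with
  | [] => []   -- string_list[0] raises IndexError on []; excluded by Pre_
  | x :: rest =>
    if 1 < string_list.length then (rest.foldl bStep ([x], qExp x, (1 : Int))).1
    else [x]

-- ===== PRECONDITION & SPEC =====
-- Pre_ excludes the empty list (A raises IndexError) and multi-element lists whose elements are not all
-- basis units: A raises KeyError on almost all of those, and on the few where a concatenation accidentally
-- forms a table key (e.g. an empty first element followed by a two-letter unit pair) B raises KeyError.
def Pre_get_running_product (string_list : List String) : Prop :=
  string_list ≠ [] ∧
    (string_list.length = 1 ∨ ∀ s ∈ string_list, s = "1" ∨ s = "i" ∨ s = "j" ∨ s = "k")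
instance (string_list : List String) : Decidable (Pre_get_running_product string_list) := by
  unfold Pre_get_running_product; infer_instance

def pvWitness_get_running_product : List String := ["i", "j", "j", "k", "1", "i"]

def Spec_get_running_product (string_list : List String) (out : List String) : Prop := out = get_running_product_alt string_list
instance (string_list : List String) (out : List String) : Decidable (Spec_get_running_product string_list out) := by unfold Spec_get_running_product; infer_instance

-- ===== CLAIM (what is proved, stated in full; the proofs are below) =====
def Claim_equal_get_running_product : Prop := ∀ (string_list : List String), Dom_get_running_product string_list → Pre_get_running_product string_list → Spec_get_running_product string_list (get_running_product string_list)

-- ===== LEMMAS AND PROOFS =====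

-- valid exponent bit / valid sign
def IsBit (e : Int) : Prop := e = 0 ∨ e = 1
def IsSign (g : Int) : Prop := g = 1 ∨ g = -1

-- decode an exponent pair back to A's symbol string
-- one step of A equals one step of B through the decoding qSym, and the invariants are preserved
lemma step_eq (out : List String) (a b g : Int) (s : String)
    (ha : IsBit a) (hb : IsBit b) (hg : IsSign g) (hs : s = "1" ∨ s = "i" ∨ s = "j" ∨ s = "k") :
    aStep (out, qSym a b, g) s
      = ((bStep (out, (a, b), g) s).1,
         qSym (bStep (out, (a, b), g) s).2.1.1 (bStep (out, (a, b), g) s).2.1.2,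
         (bStep (out, (a, b), g) s).2.2)
    ∧ IsBit (bStep (out, (a, b), g) s).2.1.1 ∧ IsBit (bStep (out, (a, b), g) s).2.1.2
    ∧ IsSign (bStep (out, (a, b), g) s).2.2 := by
  rcases ha with rfl | rfl <;> rcases hb with rfl | rfl <;> rcases hg with rfl | rfl <;>
    rcases hs with rfl | rfl | rfl | rfl <;>
    refine ⟨?_, ?_, ?_, ?_⟩ <;>
    simp [aStep, bStep, qSym, qExp, multDict, signDict, IsBit, IsSign,
          PySem.Int.mod, PySem.Int.floordiv, PySem.Dict.get?]

-- the two folds agree on any list of unit strings, from any related states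
lemma fold_eq (rest : List String) : ∀ (out : List String) (a b g : Int),
    IsBit a → IsBit b → IsSign g → (∀ s ∈ rest, s = "1" ∨ s = "i" ∨ s = "j" ∨ s = "k") →
    rest.foldl aStep (out, qSym a b, g)
      = ((rest.foldl bStep (out, (a, b), g)).1,
         qSym (rest.foldl bStep (out, (a, b), g)).2.1.1 (rest.foldl bStep (out, (a, b), g)).2.1.2,
         (rest.foldl bStep (out, (a, b), g)).2.2) := by
  induction rest with
  | nil => intro out a b g _ _ _ _; rfl
  | cons s rest ih =>
    intro out a b g ha hb hg hall
    obtain ⟨hstep, ha', hb', hg'⟩ := step_eq out a b g s ha hb hg (hall s (by simp))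
    have hrec := ih (bStep (out, (a, b), g) s).1
      (bStep (out, (a, b), g) s).2.1.1 (bStep (out, (a, b), g) s).2.1.2
      (bStep (out, (a, b), g) s).2.2 ha' hb' hg' (fun t ht => hall t (by simp [ht]))
    simp only [List.foldl_cons, hstep]
    simpa using hrec

-- A's pyRange-indexed loop is the fold of aStep over the tail
lemma a_fold (x : String) (rest : List String) :
    (PySem.List.pyRange 1 (PySem.List.len (x :: rest)) 1).foldl
      (fun st i => aStep st (PySem.List.pyGetD (x :: rest) i ""))
      ([x], x, (1 : Int))
    = rest.foldl aStep ([x], x, (1 : Int)) := by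
  have h := PySem.List.foldl_pyRange_pyGetD (xs := x :: rest) (f := aStep)
    (init := (([x], x, (1 : Int)))) (d := "") (a := 1) (by norm_num)
  simpa [PySem.List.len] using h

-- ===== VERDICT (by name: the statement is the Claim_ definition above) =====
theorem get_running_product_spec : Claim_equal_get_running_product := by
  intro string_list _ hpre
  obtain ⟨hne, hcase⟩ := hpre
  match string_list with
  | [] => exact absurd rfl hne
  | x :: [] =>
    show get_running_product [x] = get_running_product_alt [x]
    simp [get_running_product, get_running_product_alt, PySem.List.len,
      PySem.List.pyRange_one_eq_nil (a := 1) (b := 1) le_rfl]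
  | x :: y :: rest' =>
    have hall : ∀ s ∈ x :: y :: rest', s = "1" ∨ s = "i" ∨ s = "j" ∨ s = "k" := by
      rcases hcase with hlen | hall
      · simp at hlen
      · exact hall
    have hx := hall x (by simp)
    have ha : IsBit (qExp x).1 := by
      rcases hx with rfl | rfl | rfl | rfl <;> (unfold IsBit; decide)
    have hb : IsBit (qExp x).2 := by
      rcases hx with rfl | rfl | rfl | rfl <;> (unfold IsBit; decide)
    have hsym : qSym (qExp x).1 (qExp x).2 = x := by
      rcases hx with rfl | rfl | rfl | rfl <;> rfl
    show get_running_product (x :: y :: rest') = get_running_product_alt (x :: y :: rest')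
    have h := fold_eq (y :: rest') [x] (qExp x).1 (qExp x).2 1 ha hb (Or.inl rfl)
      (fun t ht => hall t (List.mem_cons_of_mem x ht))
    simp only [get_running_product, get_running_product_alt,
      List.length_cons, show (1 : Nat) < rest'.length + 1 + 1 by omega, if_pos]
    rw [a_fold]
    calc ((y :: rest').foldl aStep ([x], x, (1 : Int))).1
        = ((y :: rest').foldl aStep ([x], qSym (qExp x).1 (qExp x).2, (1 : Int))).1 := by rw [hsym]
      _ = ((y :: rest').foldl bStep ([x], ((qExp x).1, (qExp x).2), (1 : Int))).1 := by rw [h]
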